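-- pv_equiv track=rewrite | github.com/alansun17904/complexnetworks | hw/hw9/p1_sun_alan_id33.py | visited_three_times
-- ===== SOURCE A (Python) =====
-- def visited_three_times(directions):
--     """
--     Third part of problem 1
--     :param directions: str that contains '[' and ']' to denote going up and going down floors respectively.
--     :return: int first floor that Mary visits three times
--     """
--     floor_count = 0  # starting floor
--     floor_dict = {0: 1}  # dictionary whose key is floor number and value is number of times visited
--     for step_direction in directions:
--         floor_count += 1 if step_direction == '[' else -1  # adding floors accoriding to the given: [ -> +1; ] -> -1
--         if floor_count not in floor_dict.keys():  # add new floor to dictionary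
--             floor_dict[floor_count] = 1
--         else:  # increment number of visits to a floor already visited
--             floor_dict[floor_count] += 1
--         if 3 in floor_dict.values():  # search if any floor value has been visited three times
--             for floor in floor_dict:
--                 if floor_dict[floor] == 3:  # test for floor that has been visited three times
--                     return floor
-- ===== SOURCE B (Python) =====
-- def visited_three_times(directions):
--     # Staged approach: first materialize the whole itinerary of floors (prefix sums),
--     # then scan it for the first position whose floor appears three times in the
--     # prefix up to and including that position.
--     floors = [0]
--     floor = 0
--     for c in directions:
--         floor += 1 if c == '[' else -1
--         floors.append(floor)
--     for i in range(1, len(floors)):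
--         if floors[:i + 1].count(floors[i]) == 3:
--             return floors[i]
--     return None
-- ===== Notes on version B (the rewrite author's own statement) =====
-- stated objective: alternative
-- what changed: Replaces A's single streaming pass with a mutable count dictionary and per-step scans of its values/keys by two staged passes: first materialize the full prefix-sum list of visited floors, then scan it for the first position whose floor occurs three times in the prefix up to it.
import Mathlib
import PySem

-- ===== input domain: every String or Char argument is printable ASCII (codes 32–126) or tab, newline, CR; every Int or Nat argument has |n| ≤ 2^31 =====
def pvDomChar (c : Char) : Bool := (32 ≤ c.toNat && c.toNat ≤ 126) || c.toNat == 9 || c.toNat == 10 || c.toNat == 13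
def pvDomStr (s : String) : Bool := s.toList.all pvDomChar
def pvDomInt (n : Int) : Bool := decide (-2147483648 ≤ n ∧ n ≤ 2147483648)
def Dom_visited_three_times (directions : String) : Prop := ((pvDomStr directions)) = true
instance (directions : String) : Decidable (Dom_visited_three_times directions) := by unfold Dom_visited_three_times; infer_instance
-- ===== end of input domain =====

-- B replaces A's streaming pass with its count dictionary and per-step value scans by two
-- staged passes: build the full list of visited floors, then scan it for the first
-- position whose floor occurs three times in the prefix (objective: alternative, not faster).

-- ===== PORT A =====
-- the for-loop over `directions`, with early return from the inner `for floor in floor_dict`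
def vttGoA : List Char → Int → PySem.Dict Int Int → Option Int
  | [], _, _ => none
  | c :: rest, fc, d =>
    let fc' := fc + (if c = '[' then 1 else -1)
    let d' := if d.contains fc' = false then d.insert fc' 1
              else d.insert fc' (d.getD fc' 0 + 1)
    if d'.values.contains 3 then
      -- `for floor in floor_dict: if floor_dict[floor] == 3: return floor` (falls through if none)
      match d'.items.find? (fun p => p.2 == 3) with
      | some p => some p.1
      | none => vttGoA rest fc' d'
    else vttGoA rest fc' d'

def visited_three_times (directions : String) : Option Int :=
  vttGoA directions.toList 0 (PySem.Dict.ofList [((0 : Int), (1 : Int))])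

-- ===== PORT B =====
-- the scan `for i in range(1, len(floors)): if floors[:i+1].count(floors[i]) == 3: return floors[i]`
-- (`floors[i]` is exact as getD i 0: every index from range(1, len(floors)) is in range)
def vttScanB (floors : List Int) : List Nat → Option Int
  | [] => none
  | i :: rest =>
    if (floors.take (i + 1)).count (floors.getD i 0) = 3 then some (floors.getD i 0)
    else vttScanB floors rest

def visited_three_times_alt (directions : String) : Option Int :=
  -- pass 1: floors = [0]; floor = 0; for c: floor += ±1; floors.append(floor)
  let st := directions.toList.foldl
    (fun (acc : List Int × Int) c =>
      let fl' := acc.2 + (if c = '[' then 1 else -1)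
      (acc.1 ++ [fl'], fl'))
    ([(0 : Int)], (0 : Int))
  -- pass 2: range(1, len(floors))
  vttScanB st.1 (List.range' 1 (st.1.length - 1))

-- ===== PRECONDITION & SPEC =====
def Spec_visited_three_times (directions : String) (out : Option Int) : Prop := out = visited_three_times_alt directions
instance (directions : String) (out : Option Int) : Decidable (Spec_visited_three_times directions out) := by unfold Spec_visited_three_times; infer_instance

-- ===== CLAIM (what is proved, stated in full; the proofs are below) =====
def Claim_equal_visited_three_times : Prop := ∀ (directions : String), Dom_visited_three_times directions → Spec_visited_three_times directions (visited_three_times directions)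

-- ===== LEMMAS AND PROOFS =====

-- the common reference: walk the chars keeping the prefix `p` of floors visited so far
def vttRef : List Char → Int → List Int → Option Int
  | [], _, _ => none
  | c :: rest, fc, p =>
    let fl' := fc + (if c = '[' then 1 else -1)
    if p.count fl' + 1 = 3 then some fl' else vttRef rest fl' (p ++ [fl'])

-- the floors generated from `fc` by the remaining chars
def vttFloors : List Char → Int → List Int
  | [], _ => []
  | c :: rest, fc =>
    let fl' := fc + (if c = '[' then 1 else -1)
    fl' :: vttFloors rest fl'

-- `take (p.length + 1)` of `p ++ x :: F` is `p ++ [x]`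
theorem take_len_succ (p : List Int) (x : Int) (F : List Int) :
    (p ++ x :: F).take (p.length + 1) = p ++ [x] := by
  induction p with
  | nil => simp
  | cons a p ih => simpa using ih

-- first key equal to x is x itself
theorem find?_eq_self (l : List Int) (x : Int) (hx : x ∈ l) :
    l.find? (fun k => k == x) = some x := by
  induction l with
  | nil => cases hx
  | cons a l ih =>
    by_cases h : a = x
    · simp [List.find?, h]
    · have hx' : x ∈ l := by
        rcases List.mem_cons.1 hx with h' | h'
        · exact absurd h'.symm h
        · exact h'
      have hb : (a == x) = false := beq_eq_false_iff_ne.2 h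
      simp [List.find?, hb, ih hx']

theorem values_not3 (d : PySem.Dict Int Int) (hnd : d.keys.Nodup)
    (h : ∀ k : Int, d.getD k 0 ≠ 3) : d.values.contains 3 = false := by
  suffices h3 : (3 : Int) ∉ d.keys.map (fun k => d.getD k 0) by
    rw [PySem.Dict.values_eq_map_keys d hnd 0]; simpa using h3
  intro hm
  obtain ⟨k, _, hk⟩ := List.mem_map.1 hm
  exact h k hk

-- invariant tying A's count dictionary to the prefix `p` of visited floors
def vttInv (d : PySem.Dict Int Int) (p : List Int) : Prop :=
  d.keys.Nodup ∧
  (∀ k : Int, d.getD k 0 = (p.count k : Int)) ∧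
  (∀ k : Int, d.contains k = true ↔ k ∈ p) ∧
  (∀ k : Int, p.count k ≤ 2)

-- A equals the reference walk
theorem vttGoA_eq_ref (cs : List Char) : ∀ (fc : Int) (d : PySem.Dict Int Int)
    (p : List Int), vttInv d p → vttGoA cs fc d = vttRef cs fc p := by
  induction cs with
  | nil => intro _ _ _ _; rfl
  | cons c rest ih =>
    intro fc d p hinv
    obtain ⟨hnd, hcnt, hmem, hb⟩ := hinv
    simp only [vttGoA, vttRef]
    set fl' := fc + (if c = '[' then 1 else -1) with hfl
    -- in both branches A inserts count+1
    have hd' : (if d.contains fl' = false then d.insert fl' 1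
            else d.insert fl' (d.getD fl' 0 + 1)) = d.insert fl' ((p.count fl' : Int) + 1) := by
      by_cases hc : d.contains fl' = true
      · rw [hc, hcnt fl']; norm_num
      · have h0 : fl' ∉ p := fun h => hc ((hmem fl').2 h)
        have : p.count fl' = 0 := List.count_eq_zero.2 h0
        rw [eq_false_of_ne_true hc, this]; norm_num
    rw [hd']
    have hnd' : (d.insert fl' ((p.count fl' : Int) + 1)).keys.Nodup :=
      PySem.Dict.nodup_keys_insert _ _ _ hnd
    have hget : ∀ k : Int, (d.insert fl' ((p.count fl' : Int) + 1)).getD k 0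
        = if k = fl' then (p.count fl' : Int) + 1 else (p.count k : Int) := by
      intro k
      rw [PySem.Dict.getD_insert]
      by_cases hk : k = fl' <;> simp [hk, hcnt k]
    have hmemk : fl' ∈ (d.insert fl' ((p.count fl' : Int) + 1)).keys :=
      (PySem.Dict.mem_keys_insert ..).2 (Or.inl rfl)
    by_cases h3 : p.count fl' + 1 = 3
    · -- third visit: A's value scan finds 3, the key scan returns fl'
      have hg3 : ∀ k : Int, (d.insert fl' ((p.count fl' : Int) + 1)).getD k 0
          = if k = fl' then 3 else (p.count k : Int) := by
        intro k; rw [hget k]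
        by_cases hk : k = fl' <;> simp [hk]
        omega
      have hv3 : (d.insert fl' ((p.count fl' : Int) + 1)).values.contains 3 = true := by
        rw [PySem.Dict.values_eq_map_keys _ hnd' 0]
        have : (3 : Int) ∈ (d.insert fl' ((p.count fl' : Int) + 1)).keys.map
            (fun k => (d.insert fl' ((p.count fl' : Int) + 1)).getD k 0) :=
          List.mem_map.2 ⟨fl', hmemk, by rw [hg3]; simp⟩
        simpa using this
      rw [hv3]
      have hpred : (fun x : Int => (d.insert fl' ((p.count fl' : Int) + 1)).getD x 0 == 3)
          = fun k => k == fl' := by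
        funext k
        by_cases hk : k = fl'
        · subst hk; simp [hg3]
        · have hne : (d.insert fl' ((p.count fl' : Int) + 1)).getD k 0 ≠ 3 := by
            rw [hg3 k, if_neg hk]
            have := hb k; omega
          simp [hk, hne]
      have hitems : (d.insert fl' ((p.count fl' : Int) + 1)).items.find? (fun q => q.2 == 3)
          = some (fl', (d.insert fl' ((p.count fl' : Int) + 1)).getD fl' 0) := by
        rw [PySem.Dict.items_eq_map_keys _ hnd' 0, List.find?_map]
        simp only [Function.comp_def]
        rw [hpred, find?_eq_self _ _ hmemk]
        rfl
      rw [hitems]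
      simp [h3]
    · -- not a third visit: no value is 3, both recurse
      have hv3 : (d.insert fl' ((p.count fl' : Int) + 1)).values.contains 3 = false := by
        apply values_not3 _ hnd'
        intro k
        rw [hget k]
        by_cases hk : k = fl' <;> simp [hk]
        · omega
        · have := hb k; omega
      rw [hv3]
      simp only [Bool.false_eq_true, if_false, if_neg h3]
      apply ih fl' _ (p ++ [fl'])
      refine ⟨hnd', ?_, ?_, ?_⟩
      · intro k
        rw [hget k, List.count_append]
        by_cases hk : k = fl'
        · subst hk
          have h2 : List.count fl' [fl'] = 1 := by simp
          rw [if_pos rfl, h2]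
          push_cast; ring
        · have h2 : List.count k [fl'] = 0 := List.count_eq_zero.2 (by simp [hk])
          rw [if_neg hk, h2]
          simp
      · intro k
        rw [PySem.Dict.contains_insert]
        by_cases hk : k = fl' <;> simp [hk, hmem k]
      · intro k
        rw [List.count_append]
        by_cases hk : k = fl'
        · subst hk
          have h1 := hb fl'
          have h2 : List.count fl' [fl'] = 1 := by simp
          omega
        · have h2 : List.count k [fl'] = 0 := List.count_eq_zero.2 (by simp [hk])
          have := hb k
          omega

-- B's first pass builds p ++ vttFloors cs fl
theorem vttFold_fst (cs : List Char) : ∀ (fs : List Int) (fl : Int),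
    (cs.foldl (fun (acc : List Int × Int) c =>
      let fl' := acc.2 + (if c = '[' then 1 else -1)
      (acc.1 ++ [fl'], fl')) (fs, fl)).1 = fs ++ vttFloors cs fl := by
  induction cs with
  | nil => intro fs fl; simp [vttFloors]
  | cons c rest ih =>
    intro fs fl
    simp only [List.foldl, vttFloors]
    rw [ih]
    simp

-- B's second pass, started at offset p.length into p ++ floors, is the reference walk
theorem vttScanB_eq_ref (cs : List Char) : ∀ (fc : Int) (p : List Int),
    vttScanB (p ++ vttFloors cs fc) (List.range' p.length (vttFloors cs fc).length)
      = vttRef cs fc p := by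
  induction cs with
  | nil => intro fc p; simp [vttFloors, vttScanB, vttRef]
  | cons c rest ih =>
    intro fc p
    simp only [vttFloors, vttRef]
    set fl' := fc + (if c = '[' then 1 else -1) with hfl
    have hlen : (fl' :: vttFloors rest fl').length = (vttFloors rest fl').length + 1 := rfl
    rw [hlen, List.range'_succ]
    simp only [vttScanB]
    have hgd : (p ++ fl' :: vttFloors rest fl').getD p.length 0 = fl' := by
      simp [List.getD_eq_getElem?_getD]
    have htk : (p ++ fl' :: vttFloors rest fl').take (p.length + 1) = p ++ [fl'] := by
      exact take_len_succ p fl' _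
    rw [hgd, htk, List.count_append]
    have h2 : List.count fl' [fl'] = 1 := by simp
    rw [h2]
    by_cases h3 : p.count fl' + 1 = 3
    · simp [h3]
    · rw [if_neg (by simpa using h3), if_neg h3]
      have hre : p ++ fl' :: vttFloors rest fl' = (p ++ [fl']) ++ vttFloors rest fl' := by simp
      have hlp : p.length + 1 = (p ++ [fl']).length := by simp
      rw [hre, hlp]
      exact ih fl' (p ++ [fl'])

theorem vttInv_init : vttInv (PySem.Dict.ofList [((0 : Int), (1 : Int))]) [0] := by
  have hof : PySem.Dict.ofList [((0 : Int), (1 : Int))]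
      = PySem.Dict.empty.insert 0 1 := rfl
  refine ⟨by decide, ?_, ?_, ?_⟩
  · intro k
    rw [hof]
    by_cases hk : k = 0
    · subst hk; simp [PySem.Dict.getD_insert, PySem.Dict.getD_empty]
    · have h2 : List.count k [(0 : Int)] = 0 := List.count_eq_zero.2 (by simp [hk])
      simp [hk, h2, PySem.Dict.getD_insert, PySem.Dict.getD_empty]
  · intro k
    rw [hof]
    by_cases hk : k = 0 <;>
      simp [hk, PySem.Dict.contains_insert, PySem.Dict.contains_empty]
  · intro k
    by_cases hk : k = 0
    · subst hk; simp
    · have h2 : List.count k [(0 : Int)] = 0 := List.count_eq_zero.2 (by simp [hk])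
      omega

-- ===== VERDICT (by name: the statement is the Claim_ definition above) =====
theorem visited_three_times_spec : Claim_equal_visited_three_times := by
  intro directions _
  unfold Spec_visited_three_times visited_three_times visited_three_times_alt
  rw [vttGoA_eq_ref _ _ _ [0] vttInv_init]
  simp only [vttFold_fst]
  have h1 : ([(0 : Int)] ++ vttFloors directions.toList 0).length - 1
      = (vttFloors directions.toList 0).length := by simp
  rw [h1]
  exact (vttScanB_eq_ref directions.toList 0 [0]).symm
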